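-- pv_equiv track=rewrite | github.com/sangwopa/baekjoon.py | programmers/유사칸토어비트열.py | get_cantor
-- ===== SOURCE A (Python) =====
-- def get_cantor(n):
--     cantor = ['1']
--
--     for i in range(0, n):
--         tmp = []
--         for n in range(len(cantor)):
--             if cantor[n] == '0':
--                 tmp.extend(['0', '0', '0', '0', '0'])
--             else:
--                 tmp.extend(['1', '1', '0', '1', '1'])
--
--         cantor = tmp.copy()
--
--     return ''.join(cantor)
-- ===== SOURCE B (Python) =====
-- def get_cantor(n):
--     s = '1'
--     for _ in range(n):
--         s = s + s + '0' * len(s) + s + s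
--     return s
-- ===== Notes on version B (the rewrite author's own statement) =====
-- stated objective: faster
-- what changed: B builds the level-k string by whole-block concatenation from the most significant base-5 digit (s -> s+s+'0'*len(s)+s+s) instead of A's per-character scan expanding every character into five.
import Mathlib
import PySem

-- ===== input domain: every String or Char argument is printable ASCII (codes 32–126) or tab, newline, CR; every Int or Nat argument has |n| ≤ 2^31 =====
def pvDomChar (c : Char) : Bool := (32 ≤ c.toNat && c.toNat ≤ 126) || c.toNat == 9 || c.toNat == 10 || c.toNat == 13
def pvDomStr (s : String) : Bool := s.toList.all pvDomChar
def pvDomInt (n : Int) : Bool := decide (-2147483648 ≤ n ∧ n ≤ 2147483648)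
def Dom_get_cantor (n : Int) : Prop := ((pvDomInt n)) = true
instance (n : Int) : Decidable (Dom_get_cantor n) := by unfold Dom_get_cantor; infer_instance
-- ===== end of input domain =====

-- B builds each level by whole-block concatenation from the most significant base-5 digit
-- (s -> s+s+zeros+s+s) instead of A's per-character scan expanding every character into five.

-- ===== PORT A =====
def get_cantor (n : Int) : String :=
  String.mk ((PySem.List.pyRange 0 n 1).foldl (fun c _ =>
    (PySem.List.pyRange 0 (c.length : Int) 1).foldl (fun tmp j =>
      if PySem.List.pyGetD c j ' ' = '0' then tmp ++ ['0', '0', '0', '0', '0']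
      else tmp ++ ['1', '1', '0', '1', '1']) []) ['1'])

-- ===== PORT B =====
def get_cantor_alt (n : Int) : String :=
  String.mk ((PySem.List.pyRange 0 n 1).foldl (fun s _ =>
    s ++ s ++ List.replicate s.length '0' ++ s ++ s) ['1'])

-- ===== PRECONDITION & SPEC =====
def Spec_get_cantor (n : Int) (out : String) : Prop := out = get_cantor_alt n
instance (n : Int) (out : String) : Decidable (Spec_get_cantor n out) := by unfold Spec_get_cantor; infer_instance

-- ===== CLAIM (what is proved, stated in full; the proofs are below) =====
def Claim_equal_get_cantor : Prop := ∀ (n : Int), Dom_get_cantor n → Spec_get_cantor n (get_cantor n)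

-- ===== LEMMAS AND PROOFS =====

-- the character test of B: '0' iff some of the k low base-5 digits of i equals 2
def pvBit : Nat → Nat → Char
  | 0, _ => '1'
  | k+1, i => if i % 5 = 2 ∨ pvBit k (i / 5) = '0' then '0' else '1'

lemma pvBit_cases (k i : Nat) : pvBit k i = '0' ∨ pvBit k i = '1' := by
  cases k with
  | zero => right; rfl
  | succ k => unfold pvBit; split <;> simp

-- the per-character expansion of A's inner loop
def pvE (c : Char) : List Char := if c = '0' then ['0','0','0','0','0'] else ['1','1','0','1','1']

lemma A_inner (c : List Char) :
    (PySem.List.pyRange 0 (c.length : Int) 1).foldl (fun tmp j =>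
      if PySem.List.pyGetD c j ' ' = '0' then tmp ++ ['0', '0', '0', '0', '0']
      else tmp ++ ['1', '1', '0', '1', '1']) [] = c.flatMap pvE := by
  rw [PySem.List.foldl_pyRange_zero_pyGetD' c ' '
    (fun tmp ch => if ch = '0' then tmp ++ ['0', '0', '0', '0', '0'] else tmp ++ ['1', '1', '0', '1', '1']) []]
  have hf : (fun tmp ch => if ch = '0' then tmp ++ ['0', '0', '0', '0', '0']
      else tmp ++ ['1', '1', '0', '1', '1']) = fun (tmp : List Char) ch => tmp ++ pvE ch := by
    funext tmp ch; simp only [pvE]; split_ifs <;> rfl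
  rw [hf, PySem.List.foldl_append_eq_flatMap]
  simp

-- expansion advances the per-index characterisation by one level
lemma pv_expand (k m : Nat) :
    ((List.range m).map (pvBit k)).flatMap pvE = (List.range (5 * m)).map (pvBit (k + 1)) := by
  induction m with
  | zero => simp
  | succ m ih =>
    have h5 : 5 * (m + 1) = 5 * m + 5 := by ring
    rw [List.range_succ, h5, List.range_add]
    simp only [List.map_append, List.flatMap_append, ih]
    congr 1
    have hmod : ∀ r : Nat, r < 5 → (5 * m + r) % 5 = r := by intro r hr; omega
    have hdiv : ∀ r : Nat, r < 5 → (5 * m + r) / 5 = m := by intro r hr; omega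
    have hr5 : List.range 5 = [0,1,2,3,4] := by decide
    rcases pvBit_cases k m with h | h <;>
    · simp [hr5, pvE, pvBit, h, hmod 1, hmod 2, hmod 3, hmod 4,
        hdiv 1, hdiv 2, hdiv 3, hdiv 4]

-- a fold over range ignoring the index is function iteration
lemma pv_fold_ignore {α : Type} (g : α → α) (a : α) (k : Nat) :
    (List.range k).foldl (fun s _ => g s) a = g^[k] a := by
  induction k generalizing a with
  | zero => rfl
  | succ k ih =>
    rw [List.range_succ_eq_map]
    simp only [List.foldl_cons, List.foldl_map]
    rw [ih, Function.iterate_succ_apply]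

-- A's state after k expansion rounds
lemma pv_A_state (k : Nat) :
    (fun c : List Char => c.flatMap pvE)^[k] ['1'] = (List.range (5 ^ k)).map (pvBit k) := by
  induction k with
  | zero => simp [pvBit]
  | succ k ih =>
    rw [Function.iterate_succ_apply', ih, pv_expand]
    congr 1
    rw [pow_succ, Nat.mul_comm]

-- splitting off the MOST significant of k+1 base-5 digits
lemma pvBit_split (k : Nat) : ∀ (b r : Nat), b < 5 → r < 5 ^ k →
    pvBit (k + 1) (b * 5 ^ k + r) = if b = 2 ∨ pvBit k r = '0' then '0' else '1' := by
  induction k with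
  | zero =>
    intro b r hb hr
    have hr0 : r = 0 := by omega
    subst hr0
    interval_cases b <;> decide
  | succ k ih =>
    intro b r hb hr
    have e5 : 5 ^ (k + 1) = 5 * 5 ^ k := by rw [pow_succ]; ring
    have hq : b * 5 ^ (k + 1) = 5 * (b * 5 ^ k) := by rw [pow_succ]; ring
    have h1 : (b * 5 ^ (k + 1) + r) % 5 = r % 5 := by omega
    have h2 : (b * 5 ^ (k + 1) + r) / 5 = b * 5 ^ k + r / 5 := by omega
    have hr5 : r / 5 < 5 ^ k := by rw [e5] at hr; omega
    have hih := ih b (r / 5) hb hr5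
    have lhs : pvBit (k + 1 + 1) (b * 5 ^ (k + 1) + r) =
        if (b * 5 ^ (k + 1) + r) % 5 = 2 ∨ pvBit (k + 1) ((b * 5 ^ (k + 1) + r) / 5) = '0'
        then '0' else '1' := rfl
    have rhs : pvBit (k + 1) r = if r % 5 = 2 ∨ pvBit k (r / 5) = '0' then '0' else '1' := rfl
    rw [lhs, h1, h2, hih, rhs]
    by_cases hb2 : b = 2 <;> by_cases hm : r % 5 = 2 <;>
      rcases pvBit_cases k (r / 5) with h | h <;> simp [hb2, hm, h]

-- B's block concatenation advances the characterisation by one level (new top digit)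
lemma pv_B_step (k : Nat) :
    (List.range (5 ^ k)).map (pvBit k) ++ (List.range (5 ^ k)).map (pvBit k) ++
      List.replicate ((List.range (5 ^ k)).map (pvBit k)).length '0' ++
      (List.range (5 ^ k)).map (pvBit k) ++ (List.range (5 ^ k)).map (pvBit k) =
    (List.range (5 ^ (k + 1))).map (pvBit (k + 1)) := by
  have e5 : 5 ^ (k + 1) = 5 ^ k + (5 ^ k + (5 ^ k + (5 ^ k + 5 ^ k))) := by
    rw [pow_succ]; ring
  rw [e5]
  simp only [List.range_add, List.map_append, List.map_map, List.length_map,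
    List.length_range, List.append_assoc]
  congr 1
  · apply List.map_congr_left
    intro r hr
    have hr' : r < 5 ^ k := List.mem_range.mp hr
    have := pvBit_split k 0 r (by omega) hr'
    simp only [Nat.zero_mul, Nat.zero_add] at this
    rw [this]
    rcases pvBit_cases k r with h | h <;> simp [h]
  congr 1
  · apply List.map_congr_left
    intro r hr
    have hr' : r < 5 ^ k := List.mem_range.mp hr
    have := pvBit_split k 1 r (by omega) hr'
    simp only [Function.comp_apply]
    rw [show 5 ^ k + r = 1 * 5 ^ k + r by ring, this]
    rcases pvBit_cases k r with h | h <;> simp [h]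
  congr 1
  · have : ∀ r ∈ List.range (5 ^ k), pvBit (k + 1) (5 ^ k + (5 ^ k + r)) = '0' := by
      intro r hr
      have hr' : r < 5 ^ k := List.mem_range.mp hr
      have := pvBit_split k 2 r (by omega) hr'
      rw [show 5 ^ k + (5 ^ k + r) = 2 * 5 ^ k + r by ring, this]
      simp
    symm
    refine List.eq_replicate_iff.mpr ⟨by simp, ?_⟩
    intro c hc
    simp only [List.mem_map] at hc
    obtain ⟨r, hr, hrc⟩ := hc
    rw [← hrc]
    simp only [Function.comp_apply]
    exact this r hr
  congr 1
  · apply List.map_congr_left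
    intro r hr
    have hr' : r < 5 ^ k := List.mem_range.mp hr
    have := pvBit_split k 3 r (by omega) hr'
    simp only [Function.comp_apply]
    rw [show 5 ^ k + (5 ^ k + (5 ^ k + r)) = 3 * 5 ^ k + r by ring, this]
    rcases pvBit_cases k r with h | h <;> simp [h]
  · apply List.map_congr_left
    intro r hr
    have hr' : r < 5 ^ k := List.mem_range.mp hr
    have := pvBit_split k 4 r (by omega) hr'
    simp only [Function.comp_apply]
    rw [show 5 ^ k + (5 ^ k + (5 ^ k + (5 ^ k + r))) = 4 * 5 ^ k + r by ring, this]
    rcases pvBit_cases k r with h | h <;> simp [h]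

-- B's state after k concatenation rounds
lemma pv_B_state (k : Nat) :
    (fun s : List Char => s ++ s ++ List.replicate s.length '0' ++ s ++ s)^[k] ['1'] =
    (List.range (5 ^ k)).map (pvBit k) := by
  induction k with
  | zero => simp [pvBit]
  | succ k ih =>
    rw [Function.iterate_succ_apply', ih]
    exact pv_B_step k

lemma pv_B_fold (m : Nat) :
    (List.range m).foldl (fun (s : List Char) (_ : Nat) =>
      s ++ s ++ List.replicate s.length '0' ++ s ++ s) ['1'] =
    (List.range (5 ^ m)).map (pvBit m) := by
  rw [pv_fold_ignore, pv_B_state]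

lemma pv_A_fold (m : Nat) :
    (List.range m).foldl (fun c (_ : Nat) =>
      (PySem.List.pyRange 0 (c.length : Int) 1).foldl (fun tmp j =>
        if PySem.List.pyGetD c j ' ' = '0' then tmp ++ ['0', '0', '0', '0', '0']
        else tmp ++ ['1', '1', '0', '1', '1']) []) ['1'] =
    (List.range (5 ^ m)).map (pvBit m) := by
  have h := PySem.List.foldl_congr_mem (List.range m)
    (fun c (_ : Nat) => (PySem.List.pyRange 0 (c.length : Int) 1).foldl (fun tmp j =>
        if PySem.List.pyGetD c j ' ' = '0' then tmp ++ ['0', '0', '0', '0', '0']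
        else tmp ++ ['1', '1', '0', '1', '1']) [])
    (fun c _ => c.flatMap pvE) ['1'] (fun acc x _ => A_inner acc)
  rw [h, pv_fold_ignore, pv_A_state]

-- ===== VERDICT (by name: the statement is the Claim_ definition above) =====
theorem get_cantor_spec : Claim_equal_get_cantor := by
  intro n _
  unfold Spec_get_cantor get_cantor get_cantor_alt
  rw [PySem.List.pyRange_one]
  simp only [List.foldl_map]
  rw [pv_A_fold, pv_B_fold]
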